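-- pv_equiv track=rewrite | github.com/CheAnWu/cs440 | Mp3/solve.py | allVarsHaveVals
-- ===== SOURCE A (Python) =====
-- def allVarsHaveVals(rowVariables, colVariables):
--     allOnes = True
--     for var in rowVariables:
--         if(len(var) == 0):
--             return 0
--         elif(len(var) > 1):
--             allOnes = False
--     for var in colVariables:
--         if(len(var) == 0):
--             return 0
--         elif(len(var) > 1):
--             allOnes = False
--     if(allOnes):
--         return 1
--     return 2
-- ===== SOURCE B (Python) =====
-- from itertools import chain
--
-- def allVarsHaveVals(rowVariables, colVariables):
--     allVars = list(chain(rowVariables, colVariables))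
--     if any(len(v) == 0 for v in allVars):
--         return 0
--     if all(len(v) == 1 for v in allVars):
--         return 1
--     return 2
-- ===== Notes on version B (the rewrite author's own statement) =====
-- stated objective: simpler
-- what changed: Replaces the imperative two-loop pass with a mutable allOnes flag and early returns by concatenating both inputs once and classifying with two declarative reductions (any empty -> 0, all singleton -> 1, else 2).
import Mathlib
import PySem

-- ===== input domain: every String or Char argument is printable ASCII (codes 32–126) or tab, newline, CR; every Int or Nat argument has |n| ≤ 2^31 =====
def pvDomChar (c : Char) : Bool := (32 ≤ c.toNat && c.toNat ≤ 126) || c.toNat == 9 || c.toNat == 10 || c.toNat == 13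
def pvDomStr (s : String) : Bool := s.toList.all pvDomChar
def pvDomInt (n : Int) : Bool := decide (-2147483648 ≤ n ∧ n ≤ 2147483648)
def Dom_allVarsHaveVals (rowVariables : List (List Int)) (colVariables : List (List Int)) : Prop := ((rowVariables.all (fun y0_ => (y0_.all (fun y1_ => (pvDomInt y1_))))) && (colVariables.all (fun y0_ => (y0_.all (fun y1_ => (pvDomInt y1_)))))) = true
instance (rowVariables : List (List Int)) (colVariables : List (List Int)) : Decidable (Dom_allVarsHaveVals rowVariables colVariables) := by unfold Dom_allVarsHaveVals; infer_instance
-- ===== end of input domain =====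

-- B replaces A's single imperative pass with a mutable flag and early returns by one
-- concatenation followed by two declarative reductions (objective: simpler).

-- ===== PORT A =====
-- A's loop over one list: returns none on an early `return 0` (an empty var), otherwise
-- some of the updated allOnes flag.
def allVarsHaveValsLoop (vars : List (List Int)) (allOnes : Bool) : Option Bool :=
  match vars with
  | [] => some allOnes
  | v :: rest =>
    if v.length = 0 then none
    else if v.length > 1 then allVarsHaveValsLoop rest false
    else allVarsHaveValsLoop rest allOnes

def allVarsHaveVals (rowVariables : List (List Int)) (colVariables : List (List Int)) : Int :=
  match allVarsHaveValsLoop rowVariables true with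
  | none => 0
  | some allOnes =>
    match allVarsHaveValsLoop colVariables allOnes with
    | none => 0
    | some allOnes' => if allOnes' then 1 else 2

-- ===== PORT B =====
def allVarsHaveVals_alt (rowVariables : List (List Int)) (colVariables : List (List Int)) : Int :=
  let allVars := rowVariables ++ colVariables
  if allVars.any (fun v => v.length == 0) then 0
  else if allVars.all (fun v => v.length == 1) then 1
  else 2

-- ===== PRECONDITION & SPEC =====
def Spec_allVarsHaveVals (rowVariables : List (List Int)) (colVariables : List (List Int)) (out : Int) : Prop := out = allVarsHaveVals_alt rowVariables colVariables
instance (rowVariables : List (List Int)) (colVariables : List (List Int)) (out : Int) : Decidable (Spec_allVarsHaveVals rowVariables colVariables out) := by unfold Spec_allVarsHaveVals; infer_instance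

-- ===== CLAIM (what is proved, stated in full; the proofs are below) =====
def Claim_equal_allVarsHaveVals : Prop := ∀ (rowVariables : List (List Int)) (colVariables : List (List Int)), Dom_allVarsHaveVals rowVariables colVariables → Spec_allVarsHaveVals rowVariables colVariables (allVarsHaveVals rowVariables colVariables)

-- ===== LEMMAS AND PROOFS =====
theorem allVarsHaveValsLoop_eq (vars : List (List Int)) (allOnes : Bool) :
    allVarsHaveValsLoop vars allOnes =
      if vars.any (fun v => v.length == 0) then none
      else some (allOnes && vars.all (fun v => v.length == 1)) := by
  induction vars generalizing allOnes with
  | nil => simp [allVarsHaveValsLoop]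
  | cons v rest ih =>
    simp only [allVarsHaveValsLoop, List.any_cons, List.all_cons]
    by_cases h0 : v.length = 0
    · simp [h0]
    · by_cases h1 : v.length > 1
      · have hne : (v.length == 1) = false := by
          rw [beq_eq_false_iff_ne]; omega
        simp [h0, h1, ih, hne]
      · have h1' : v.length = 1 := by omega
        simp [ih, h1']

theorem allVarsHaveVals_spec : Claim_equal_allVarsHaveVals := by
  unfold Claim_equal_allVarsHaveVals
  intro rc cc _
  unfold Spec_allVarsHaveVals allVarsHaveVals allVarsHaveVals_alt
  simp only [allVarsHaveValsLoop_eq, List.any_append, List.all_append]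
  by_cases hr : rc.any (fun v => v.length == 0) <;>
    by_cases hc : cc.any (fun v => v.length == 0) <;>
      by_cases ha : rc.all (fun v => v.length == 1) && cc.all (fun v => v.length == 1) <;>
        simp_all
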